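-- pv_equiv track=rewrite | github.com/yugjasoliya/ats-resume-parser | ats_core.py | locate_sections
-- ===== SOURCE A (Python) =====
-- from typing import List, Dict, Any, Tuple
--
-- SECTION_HEADERS = [
--     'summary', 'objective', 'education', 'experience', 'work experience',
--     'professional experience', 'projects', 'skills', 'certifications',
--     'publications', 'awards', 'achievements', 'languages', 'interests'
-- ]
--
-- def locate_sections(lines: List[str]) -> Dict[str, Tuple[int, int]]:
--     indices = []
--     for idx, line in enumerate(lines):
--         ll = line.lower().strip(': ').strip()
--         for header in SECTION_HEADERS:
--             if ll == header or ll.startswith(header):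
--                 indices.append((header, idx))
--                 break
--     indices.sort(key=lambda x: x[1])
--     sections = {}
--     for i, (header, start) in enumerate(indices):
--         end = indices[i + 1][1] if i + 1 < len(indices) else len(lines)
--         sections[header] = (start + 1, end)
--     return sections
-- ===== SOURCE B (Python) =====
-- from typing import List, Dict, Tuple
--
-- SECTION_HEADERS = [
--     'summary', 'objective', 'education', 'experience', 'work experience',
--     'professional experience', 'projects', 'skills', 'certifications',
--     'publications', 'awards', 'achievements', 'languages', 'interests'
-- ]
--
-- def locate_sections(lines: List[str]) -> Dict[str, Tuple[int, int]]:
--     # Walk the lines BACKWARDS: at each matching line the section's end is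
--     # simply the nearest match index seen so far (initially len(lines)),
--     # so each triple (header, start, end) is complete the moment it is built.
--     rev = []
--     boundary = len(lines)
--     for idx, line in reversed(list(enumerate(lines))):
--         ll = line.lower().strip(': ').strip()
--         h = next((hd for hd in SECTION_HEADERS
--                   if ll == hd or ll.startswith(hd)), None)
--         if h is not None:
--             rev.append((h, idx + 1, boundary))
--             boundary = idx
--     sections = {}
--     for h, s, e in reversed(rev):
--         sections[h] = (s, e)
--     return sections
-- ===== Notes on version B (the rewrite author's own statement) =====
-- stated objective: alternative
-- what changed: Replaced A's forward collect-then-sort-then-indexed-lookahead pipeline by a single reverse traversal that carries the nearest boundary seen so far, so each (header, start, end) triple is complete when built; no sort and no index lookahead.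
import Mathlib
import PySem

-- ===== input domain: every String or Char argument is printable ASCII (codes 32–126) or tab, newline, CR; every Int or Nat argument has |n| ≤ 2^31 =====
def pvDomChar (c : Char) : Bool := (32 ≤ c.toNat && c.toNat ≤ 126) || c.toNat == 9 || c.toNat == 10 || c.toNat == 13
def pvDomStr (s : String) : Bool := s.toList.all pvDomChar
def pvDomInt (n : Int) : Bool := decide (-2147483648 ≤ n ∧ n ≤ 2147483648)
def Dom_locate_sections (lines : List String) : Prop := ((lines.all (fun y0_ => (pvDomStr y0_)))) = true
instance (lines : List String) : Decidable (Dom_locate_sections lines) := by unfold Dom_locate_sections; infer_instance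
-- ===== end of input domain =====

-- B replaces A's forward collect/sort/indexed-lookahead pipeline by one reverse traversal carrying the nearest boundary seen so far; alternative decomposition, same result.

def SECTION_HEADERS : List String := [
  "summary", "objective", "education", "experience", "work experience",
  "professional experience", "projects", "skills", "certifications",
  "publications", "awards", "achievements", "languages", "interests"]

-- ===== PORT A =====
-- inner 'for header in SECTION_HEADERS: … break' = first header passing the test
def pvMatchA (line : String) : Option String :=
  let ll := PySem.Str.strip (PySem.Str.stripChars (PySem.Str.lower line) ": ")
  SECTION_HEADERS.find? (fun header => ll == header || PySem.Str.startswith ll header)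

def locate_sections (lines : List String) : List (String × Int × Int) :=
  let indices : List (String × Int) :=
    (PySem.List.enumerate lines).foldl (fun acc p =>
      match pvMatchA p.2 with
      | some header => acc ++ [(header, p.1)]
      | none => acc) []
  let indices := PySem.List.sorted indices (fun x => x.2) false
  let sections : PySem.Dict String (Int × Int) :=
    (PySem.List.enumerate indices).foldl (fun d q =>
      let e : Int := if q.1 + 1 < PySem.List.len indices
                     then (PySem.List.pyGetD indices (q.1 + 1) ("", 0)).2
                     else PySem.List.len lines
      d.insert q.2.1 (q.2.2 + 1, e)) PySem.Dict.empty
  sections.items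

-- ===== PORT B =====
-- 'next((hd for hd in SECTION_HEADERS if ll == hd or ll.startswith(hd)), None)'
def pvMatchB (line : String) : Option String :=
  let ll := PySem.Str.strip (PySem.Str.stripChars (PySem.Str.lower line) ": ")
  SECTION_HEADERS.find? (fun hd => ll == hd || PySem.Str.startswith ll hd)

def locate_sections_alt (lines : List String) : List (String × Int × Int) :=
  -- for idx, line in reversed(list(enumerate(lines))): …
  let st : List (String × Int × Int) × Int :=
    (PySem.List.enumerate lines).reverse.foldl (fun st p =>
      match pvMatchB p.2 with
      | some h => (st.1 ++ [(h, p.1 + 1, st.2)], p.1)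
      | none => st) ([], PySem.List.len lines)
  -- for h, s, e in reversed(rev): sections[h] = (s, e)
  let sections : PySem.Dict String (Int × Int) :=
    st.1.reverse.foldl (fun d t => d.insert t.1 (t.2.1, t.2.2)) PySem.Dict.empty
  sections.items

-- ===== PRECONDITION & SPEC =====
def Spec_locate_sections (lines : List String) (out : List (String × Int × Int)) : Prop := out = locate_sections_alt lines
instance (lines : List String) (out : List (String × Int × Int)) : Decidable (Spec_locate_sections lines out) := by unfold Spec_locate_sections; infer_instance

-- ===== CLAIM (what is proved, stated in full; the proofs are below) =====
def Claim_equal_locate_sections : Prop := ∀ (lines : List String), Dom_locate_sections lines → Spec_locate_sections lines (locate_sections lines)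

-- ===== LEMMAS AND PROOFS =====

-- the (header, idx) pairs both programs detect, in line order
def pvIdxs (lines : List String) : List (String × Int) :=
  (PySem.List.enumerate lines).filterMap (fun p => (pvMatchA p.2).map (fun h => (h, p.1)))

-- the (header, start, end) triples: end = next match index, N for the last
def pvTrip (l : List (String × Int)) (N : Int) : List (String × Int × Int) :=
  match l with
  | [] => []
  | (h, i) :: t => (h, i + 1, match t with | [] => N | (_, j) :: _ => j) :: pvTrip t N

-- A's second loop, as structural recursion with explicit lookahead (N = len lines)
def pvAloop (d : PySem.Dict String (Int × Int)) (l : List (String × Int)) (N : Int) :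
    PySem.Dict String (Int × Int) :=
  match l with
  | [] => d
  | (h, i) :: t => pvAloop (d.insert h (i + 1, match t with | [] => N | (_, j) :: _ => j)) t N

theorem pvMatch_eq (line : String) : pvMatchB line = pvMatchA line := rfl

-- A's first loop collects exactly pvIdxs
theorem pvAfirst_eq (l : List (Int × String)) (acc : List (String × Int)) :
    l.foldl (fun acc p =>
      match pvMatchA p.2 with
      | some header => acc ++ [(header, p.1)]
      | none => acc) acc
      = acc ++ l.filterMap (fun p => (pvMatchA p.2).map (fun h => (h, p.1))) := by
  induction l generalizing acc with
  | nil => simp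
  | cons p t ih =>
    cases hm : pvMatchA p.2 <;> simp [List.foldl_cons, hm, ih]

-- detected indices are strictly increasing in their line number
theorem pvIdxs_pairwise (lines : List String) :
    (pvIdxs lines).Pairwise (fun a b => a.2 < b.2) := by
  unfold pvIdxs
  rw [List.pairwise_filterMap]
  refine (PySem.List.pairwise_lt_enumerate (xs := lines) (s := 0)).imp ?_
  intro a b hab x hx y hy
  cases hma : pvMatchA a.2 <;> cases hmb : pvMatchA b.2 <;>
    simp [hma, hmb] at hx hy
  subst hx; subst hy
  simpa using hab

-- hence A's sort is the identity
theorem pvSort_id (lines : List String) :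
    PySem.List.sorted (pvIdxs lines) (fun x => x.2) false = pvIdxs lines :=
  PySem.List.sorted_eq_of_perm_of_pairwise_lt _ _ _ (List.Perm.refl _) (pvIdxs_pairwise lines)

-- A's indexed second loop with lookahead equals pvAloop (suffix induction)
theorem pvAsecond_eq (full : List (String × Int)) (N : Int) :
    ∀ (t : List (String × Int)) (s : Nat) (d : PySem.Dict String (Int × Int)),
    full.drop s = t →
    (PySem.List.enumerate t (s : Int)).foldl (fun d q =>
      d.insert q.2.1 (q.2.2 + 1,
        if q.1 + 1 < PySem.List.len full
        then (PySem.List.pyGetD full (q.1 + 1) ("", 0)).2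
        else N)) d
      = pvAloop d t N := by
  intro t
  induction t with
  | nil => intro s d _; simp [pvAloop]
  | cons x t' ih =>
    intro s d hdrop
    obtain ⟨h, i⟩ := x
    have hs : s < full.length := by
      by_contra hc
      push Not at hc
      simp [List.drop_eq_nil_of_le hc] at hdrop
    have hdrop' : full.drop (s + 1) = t' := by
      have := congrArg (List.drop 1) hdrop
      simpa [List.drop_drop, Nat.add_comm] using this
    rw [PySem.List.enumerate_cons, List.foldl_cons]
    have hcast : (s : Int) + 1 = ((s + 1 : Nat) : Int) := by push_cast; ring
    have hlen : PySem.List.len full = (full.length : Int) := PySem.List.len_eq full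
    have hstep := ih (s + 1)
    cases t' with
    | nil =>
      have hfl : full.length = s + 1 := by
        have := congrArg List.length hdrop
        simp at this
        omega
      have hcond : ¬ (((s + 1 : Nat) : Int) < PySem.List.len full) := by
        rw [hlen, hfl]; exact lt_irrefl _
      rw [hcast, if_neg hcond]
      simp [pvAloop]
    | cons y rest =>
      obtain ⟨yh, yi⟩ := y
      have hlt : s + 1 < full.length := by
        by_contra hc
        push Not at hc
        simp [List.drop_eq_nil_of_le hc] at hdrop'
      have hcond : (((s + 1 : Nat) : Int) < PySem.List.len full) := by
        rw [hlen]; exact_mod_cast hlt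
      have hget : PySem.List.pyGetD full (((s + 1 : Nat) : Int)) ("", 0) = (yh, yi) := by
        rw [PySem.List.pyGetD_natCast]
        rw [List.getD_eq_getElem _ _ hlt]
        have h0 : (full.drop (s+1))[0]'(by simp [hdrop']) = full[s + 1 + 0] :=
          List.getElem_drop (xs := full) (i := s+1) (j := 0) (h := by simpa using hlt)
        simp [hdrop'] at h0
        simpa using h0.symm
      rw [hcast, if_pos hcond, hget]
      simpa [pvAloop] using hstep (d.insert h (i + 1, yi)) hdrop'

-- pvAloop is the fold of dict inserts over the triples
theorem pvAloop_trip (l : List (String × Int)) (N : Int) (d : PySem.Dict String (Int × Int)) :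
    pvAloop d l N = (pvTrip l N).foldl (fun d t => d.insert t.1 (t.2.1, t.2.2)) d := by
  induction l generalizing d with
  | nil => simp [pvAloop, pvTrip]
  | cons x t ih =>
    obtain ⟨h, i⟩ := x
    simp [pvAloop, pvTrip, ih]

-- B's reverse pass builds exactly the reversed triples, and ends with the first match index
theorem pvBfold (L : List (Int × String)) (N : Int) :
    L.foldr (fun p st =>
      match pvMatchB p.2 with
      | some h => (st.1 ++ [(h, p.1 + 1, st.2)], p.1)
      | none => st) (([] : List (String × Int × Int)), N)
    = ((pvTrip (L.filterMap (fun p => (pvMatchA p.2).map (fun h => (h, p.1)))) N).reverse,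
       match L.filterMap (fun p => (pvMatchA p.2).map (fun h => (h, p.1))) with
       | [] => N
       | (_, i) :: _ => i) := by
  induction L with
  | nil => simp [pvTrip]
  | cons p t ih =>
    rw [List.foldr_cons, ih]
    cases hm : pvMatchA p.2 with
    | none => simp [pvMatch_eq, hm]
    | some h =>
      cases ht : t.filterMap (fun p => (pvMatchA p.2).map (fun h => (h, p.1))) <;>
        simp [pvMatch_eq, hm, ht, pvTrip]

-- ===== VERDICT (by name: the statement is the Claim_ definition above) =====
theorem locate_sections_spec : Claim_equal_locate_sections := by
  intro lines _
  unfold Spec_locate_sections locate_sections locate_sections_alt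
  rw [pvAfirst_eq]
  simp only [List.nil_append]
  rw [show (PySem.List.enumerate lines).filterMap
        (fun p => (pvMatchA p.2).map (fun h => (h, p.1))) = pvIdxs lines from rfl]
  rw [pvSort_id]
  have hA := pvAsecond_eq (pvIdxs lines) (PySem.List.len lines) (pvIdxs lines) 0
      PySem.Dict.empty (by simp)
  simp only [Nat.cast_zero] at hA
  rw [hA, pvAloop_trip]
  have hB := pvBfold (PySem.List.enumerate lines) (PySem.List.len lines)
  rw [show (PySem.List.enumerate lines).filterMap
        (fun p => (pvMatchA p.2).map (fun h => (h, p.1))) = pvIdxs lines from rfl] at hB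
  simp only [List.foldl_reverse]
  rw [hB]
  simp only [List.foldr_reverse]
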